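-- pv_equiv track=rewrite | github.com/djg536/Arbiter | Arbiter/Arbiter.py | compareFindings
-- ===== SOURCE A (Python) =====
-- def compareFindings(found_list, test_list):
--     #Returns the number of strings in found_list which are substrings of the strings in test_list
--     #Used to measure the recall rates of found strings (found_list) from the original (test_list)
--     #found_list - the list of strings representing those extracted from the documents
--     #test_list - the list of sentences loaded from the dataset
--
--     count = 0
--     for found in found_list:
--         for test in test_list:
--             if found in test:
--                 count+=1
--                 break
--     return count
-- ===== SOURCE B (Python) =====
-- def compareFindings(found_list, test_list):
--     # Build a set of every substring occurring in any test string once,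
--     # then answer each found-string query by one set lookup.
--     subs = set()
--     for test in test_list:
--         n = len(test)
--         for i in range(n + 1):
--             for j in range(i, n + 1):
--                 subs.add(test[i:j])
--     count = 0
--     for found in found_list:
--         if found in subs:
--             count += 1
--     return count
-- ===== Notes on version B (the rewrite author's own statement) =====
-- stated objective: faster
-- what changed: B precomputes a hash set of all substrings of the test strings once, then answers each found string with a single set lookup, eliminating A's per-found scan over test_list with substring search in each pair.
import Mathlib
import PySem

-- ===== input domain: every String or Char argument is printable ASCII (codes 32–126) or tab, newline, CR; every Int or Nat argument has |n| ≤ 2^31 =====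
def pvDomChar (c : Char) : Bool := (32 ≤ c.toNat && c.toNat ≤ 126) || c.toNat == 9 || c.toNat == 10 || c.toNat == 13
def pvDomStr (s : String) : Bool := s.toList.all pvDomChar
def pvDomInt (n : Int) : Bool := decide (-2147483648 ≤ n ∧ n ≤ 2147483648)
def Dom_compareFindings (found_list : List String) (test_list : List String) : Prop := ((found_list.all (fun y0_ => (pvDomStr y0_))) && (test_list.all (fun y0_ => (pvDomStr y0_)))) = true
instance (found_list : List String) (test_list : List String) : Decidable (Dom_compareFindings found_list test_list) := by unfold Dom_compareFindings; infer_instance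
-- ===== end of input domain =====

-- B builds the set of all substrings of the test strings once and answers each
-- found string by one set lookup, instead of A's inner scan of test_list per found string.

-- ===== PORT A =====
-- inner 'for test in test_list: if found in test: count += 1; break'
def pvLoopA (found : String) : List String → Int → Int
  | [], c => c
  | t :: ts, c => if PySem.Str.isIn found t then c + 1 else pvLoopA found ts c

def compareFindings (found_list : List String) (test_list : List String) : Int :=
  found_list.foldl (fun c found => pvLoopA found test_list c) 0

-- ===== PORT B =====
-- 'for i in range(n+1): for j in range(i, n+1): subs.add(test[i:j])'
def pvAddSubs (subs : PySem.Set String) (test : String) : PySem.Set String :=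
  let n : Int := PySem.Str.len test
  (PySem.List.pyRange 0 (n + 1) 1).foldl (fun s i =>
    (PySem.List.pyRange i (n + 1) 1).foldl (fun s j =>
      PySem.Set.add s (PySem.Str.slice test (some i) (some j))) s) subs

def compareFindings_alt (found_list : List String) (test_list : List String) : Int :=
  let subs := test_list.foldl pvAddSubs PySem.Set.empty
  found_list.foldl (fun c found => if PySem.Set.contains subs found then c + 1 else c) 0

-- ===== PRECONDITION & SPEC =====
def Spec_compareFindings (found_list : List String) (test_list : List String) (out : Int) : Prop := out = compareFindings_alt found_list test_list
instance (found_list : List String) (test_list : List String) (out : Int) : Decidable (Spec_compareFindings found_list test_list out) := by unfold Spec_compareFindings; infer_instance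

-- ===== CLAIM (what is proved, stated in full; the proofs are below) =====
def Claim_equal_compareFindings : Prop := ∀ (found_list : List String) (test_list : List String), Dom_compareFindings found_list test_list → Spec_compareFindings found_list test_list (compareFindings found_list test_list)

-- ===== LEMMAS AND PROOFS =====

-- membership in a fold of Set.add
theorem pv_mem_foldl_add {α β : Type} [BEq α] [LawfulBEq α] (l : List β) (g : β → α)
    (s : PySem.Set α) (y : α) :
    (y ∈ l.foldl (fun s b => PySem.Set.add s (g b)) s) ↔ y ∈ s ∨ ∃ b ∈ l, g b = y := by
  induction l generalizing s with
  | nil => simp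
  | cons b bs ih =>
    simp only [List.foldl_cons, ih, PySem.Set.mem_add, List.mem_cons]
    constructor
    · rintro ((h | h) | ⟨x, hx, hgx⟩)
      · exact Or.inl h
      · exact Or.inr ⟨b, Or.inl rfl, h.symm⟩
      · exact Or.inr ⟨x, Or.inr hx, hgx⟩
    · rintro (h | ⟨x, (rfl | hx), hgx⟩)
      · exact Or.inl (Or.inl h)
      · exact Or.inl (Or.inr hgx.symm)
      · exact Or.inr ⟨x, hx, hgx⟩

-- membership in a nested fold of Set.add
theorem pv_mem_foldl_foldl_add {α β γ : Type} [BEq α] [LawfulBEq α]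
    (l : List β) (inner : β → List γ) (g : β → γ → α) (s : PySem.Set α) (y : α) :
    (y ∈ l.foldl (fun s i => (inner i).foldl (fun s j => PySem.Set.add s (g i j)) s) s)
      ↔ y ∈ s ∨ ∃ i ∈ l, ∃ j ∈ inner i, g i j = y := by
  induction l generalizing s with
  | nil => simp
  | cons b bs ih =>
    simp only [List.foldl_cons, ih, pv_mem_foldl_add, List.mem_cons]
    constructor
    · rintro ((h | ⟨j, hj, hg⟩) | ⟨i, hi, hj⟩)
      · exact Or.inl h
      · exact Or.inr ⟨b, Or.inl rfl, j, hj, hg⟩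
      · exact Or.inr ⟨i, Or.inr hi, hj⟩
    · rintro (h | ⟨i, (rfl | hi), hj⟩)
      · exact Or.inl (Or.inl h)
      · exact Or.inl (Or.inr hj)
      · exact Or.inr ⟨i, hi, hj⟩

-- a take-of-drop is an infix
theorem pv_slice_infix (cs : List Char) (a b : Nat) :
    (cs.drop a).take b <:+: cs :=
  ((cs.drop a).take_prefix b).isInfix.trans (cs.drop_suffix a).isInfix

theorem pv_mem_addSubs (subs : PySem.Set String) (t : String) (f : String) :
    f ∈ pvAddSubs subs t ↔ f ∈ subs ∨ PySem.Str.isIn f t = true := by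
  unfold pvAddSubs
  rw [pv_mem_foldl_foldl_add]
  simp only [PySem.List.mem_pyRange_one, PySem.Str.isIn_iff_infix]
  constructor
  · rintro (h | h)
    · exact Or.inl h
    · obtain ⟨i, ⟨hi0, _⟩, j, ⟨hij, _⟩, hslice⟩ := h
      refine Or.inr ?_
      have hj0 : (0:Int) ≤ j := le_trans hi0 hij
      have : (PySem.Str.slice t (some i) (some j)).toList
          = (t.toList.drop i.toNat).take (j.toNat - i.toNat) := by
        simp [PySem.List.slice_toNat _ hi0 hj0]
      rw [← hslice, this]
      exact pv_slice_infix _ _ _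
  · rintro (h | h)
    · exact Or.inl h
    · obtain ⟨s₁, s₂, hsplit⟩ := h
      have hL : t.toList.length = t.length := by simp
      have hF : f.toList.length = f.length := by simp
      have hlen : s₁.length + f.toList.length + s₂.length = t.toList.length := by
        rw [← hsplit]; simp; omega
      refine Or.inr ⟨(s₁.length : Int), ⟨by positivity, by simp [PySem.Str.len_eq]; omega⟩,
        (s₁.length : Int) + (f.toList.length : Int), ⟨by omega, by simp [PySem.Str.len_eq]; omega⟩, ?_⟩
      apply String.toList_inj.mp
      have hrw := PySem.List.slice_natCast_add (xs := t.toList) (j := s₁.length) (n := f.toList.length)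
      simp only [PySem.Str.toList_slice, PySem.Chars.slice_eq_listSlice]
      rw [hrw, ← hsplit]
      rw [show s₁ ++ f.toList ++ s₂ = s₁ ++ (f.toList ++ s₂) by simp]
      rw [List.drop_left, List.take_left]

theorem pv_contains_build (test_list : List String) (f : String) :
    PySem.Set.contains (test_list.foldl pvAddSubs PySem.Set.empty) f
      = test_list.any (fun t => PySem.Str.isIn f t) := by
  have key : ∀ (s : PySem.Set String),
      f ∈ test_list.foldl pvAddSubs s ↔ f ∈ s ∨ ∃ t ∈ test_list, PySem.Str.isIn f t = true := by
    induction test_list with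
    | nil => intro s; simp
    | cons t ts ih =>
      intro s
      simp only [List.foldl_cons, ih, pv_mem_addSubs, List.mem_cons]
      constructor
      · rintro ((h | h) | ⟨x, hx, hin⟩)
        · exact Or.inl h
        · exact Or.inr ⟨t, Or.inl rfl, h⟩
        · exact Or.inr ⟨x, Or.inr hx, hin⟩
      · rintro (h | ⟨x, (rfl | hx), hin⟩)
        · exact Or.inl (Or.inl h)
        · exact Or.inl (Or.inr hin)
        · exact Or.inr ⟨x, hx, hin⟩
  rw [Bool.eq_iff_iff]
  simp only [PySem.Set.contains_iff, List.any_eq_true, key]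
  simp [PySem.Set.empty]

theorem pv_loopA_eq (f : String) (ts : List String) (c : Int) :
    pvLoopA f ts c = if ts.any (fun t => PySem.Str.isIn f t) then c + 1 else c := by
  induction ts with
  | nil => simp [pvLoopA]
  | cons t ts ih =>
    by_cases h : PySem.Chars.isIn f.toList t.toList = true
    · simp [pvLoopA, h]
    · simp [pvLoopA, h, ih]

-- ===== VERDICT (by name: the statement is the Claim_ definition above) =====
theorem compareFindings_spec : Claim_equal_compareFindings := by
  intro found_list test_list _
  unfold Spec_compareFindings compareFindings compareFindings_alt
  have hstep : (fun (c : Int) (found : String) => pvLoopA found test_list c)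
      = fun (c : Int) (found : String) =>
          if PySem.Set.contains (test_list.foldl pvAddSubs PySem.Set.empty) found then c + 1 else c := by
    funext c found
    rw [pv_loopA_eq, pv_contains_build]
  rw [hstep]
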